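-- pv_equiv track=rewrite | github.com/Chrellem/Mailbesvarelse | streamlit_app.py | select_program_rows
-- ===== SOURCE A (Python) =====
-- from typing import List, Dict, Any, Tuple
--
-- def select_program_rows(programme_name_or_id: str, programs_kb: List[Dict[str,str]]) -> List[Dict[str,str]]:
--     if not programme_name_or_id or not programs_kb:
--         return []
--     target = str(programme_name_or_id).strip().lower()
--     matches = [r for r in programs_kb if (str(r.get("programme","")).strip().lower() == target) or (str(r.get("id","")).strip().lower() == target)]
--     if not matches:
--         matches = [r for r in programs_kb if target in (str(r.get("programme","")).strip().lower()) or target in (str(r.get("id","")).strip().lower())]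
--     return matches
-- ===== SOURCE B (Python) =====
-- from typing import List, Dict
--
-- def select_program_rows(programme_name_or_id: str, programs_kb: List[Dict[str, str]]) -> List[Dict[str, str]]:
--     if not programme_name_or_id or not programs_kb:
--         return []
--     target = str(programme_name_or_id).strip().lower()
--
--     def rank(r):
--         prog = str(r.get("programme", "")).strip().lower()
--         rid = str(r.get("id", "")).strip().lower()
--         if prog == target or rid == target:
--             return 0
--         if target in prog or target in rid:
--             return 1
--         return 2
--
--     ranked = [(rank(r), r) for r in programs_kb]
--     best = 2
--     for rk, _ in ranked:
--         best = min(best, rk)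
--     if best == 2:
--         return []
--     return [r for rk, r in ranked if rk == best]
-- ===== Notes on version B (the rewrite author's own statement) =====
-- stated objective: alternative
-- what changed: Replaces A's staged fallback (exact-match comprehension, then a second substring-match comprehension only if the first is empty) with a rank-and-argmin selection: each row is classified once into rank 0 (exact), 1 (substring) or 2 (no match), the minimum rank is computed, and the rows achieving that minimum are returned (none if the minimum is 2); correct because an exact match is also a substring match, so rank 0 rows are exactly A's first pass and, when none exist, rank 1 rows are exactly A's fallback pass.
import Mathlib
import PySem

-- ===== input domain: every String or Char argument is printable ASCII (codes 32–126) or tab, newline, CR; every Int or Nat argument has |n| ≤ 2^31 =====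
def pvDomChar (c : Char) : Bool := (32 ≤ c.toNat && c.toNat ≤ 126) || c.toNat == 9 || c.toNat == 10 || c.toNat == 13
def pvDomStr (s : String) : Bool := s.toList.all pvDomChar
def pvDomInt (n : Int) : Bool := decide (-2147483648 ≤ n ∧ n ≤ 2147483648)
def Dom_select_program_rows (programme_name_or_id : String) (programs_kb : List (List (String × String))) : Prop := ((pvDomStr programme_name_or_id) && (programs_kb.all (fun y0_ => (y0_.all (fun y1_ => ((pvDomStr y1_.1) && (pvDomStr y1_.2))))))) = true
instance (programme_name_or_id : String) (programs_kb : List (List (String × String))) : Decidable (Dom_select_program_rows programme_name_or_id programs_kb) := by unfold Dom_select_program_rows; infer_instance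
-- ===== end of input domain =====

-- B replaces A's staged fallback (exact pass, then substring pass) with a rank-and-argmin
-- selection: rows are classified once into rank 0/1/2 and the minimum-rank rows are returned
-- (alternative decomposition, same cost).


-- ===== PORT A =====
def select_program_rows (programme_name_or_id : String) (programs_kb : List (List (String × String))) : List (List (String × String)) :=
  if programme_name_or_id = "" ∨ programs_kb = [] then []
  else
    let target := PySem.Str.lower (PySem.Str.strip programme_name_or_id)
    let mres := programs_kb.filter
      (fun r => PySem.Str.lower (PySem.Str.strip ((PySem.Dict.mk r).getD "programme" "")) == target ||
                PySem.Str.lower (PySem.Str.strip ((PySem.Dict.mk r).getD "id" "")) == target)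
    if mres = [] then
      programs_kb.filter
        (fun r => PySem.Str.isIn target (PySem.Str.lower (PySem.Str.strip ((PySem.Dict.mk r).getD "programme" ""))) ||
                  PySem.Str.isIn target (PySem.Str.lower (PySem.Str.strip ((PySem.Dict.mk r).getD "id" ""))))
    else mres

-- ===== PORT B =====
-- Source B's rank(r): 0 = exact match, 1 = substring match, 2 = no match
-- (prog == target or rid == target), the exact-match test of Source B's rank
def pvExact (target : String) (r : List (String × String)) : Bool :=
  PySem.Str.lower (PySem.Str.strip ((PySem.Dict.mk r).getD "programme" "")) == target ||
  PySem.Str.lower (PySem.Str.strip ((PySem.Dict.mk r).getD "id" "")) == target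

-- (target in prog or target in rid), the substring test of Source B's rank
def pvSub (target : String) (r : List (String × String)) : Bool :=
  PySem.Str.isIn target (PySem.Str.lower (PySem.Str.strip ((PySem.Dict.mk r).getD "programme" ""))) ||
  PySem.Str.isIn target (PySem.Str.lower (PySem.Str.strip ((PySem.Dict.mk r).getD "id" "")))

def pvRankB (target : String) (r : List (String × String)) : Nat :=
  if pvExact target r then 0
  else if pvSub target r then 1
  else 2

def select_program_rows_alt (programme_name_or_id : String) (programs_kb : List (List (String × String))) : List (List (String × String)) :=
  if programme_name_or_id = "" ∨ programs_kb = [] then []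
  else
    let target := PySem.Str.lower (PySem.Str.strip programme_name_or_id)
    let ranked := programs_kb.map (fun r => (pvRankB target r, r))
    -- best = 2; for rk, _ in ranked: best = min(best, rk)
    let best := ranked.foldl (fun best p => min best p.1) 2
    if best == 2 then []
    else (ranked.filter (fun p => p.1 == best)).map (fun p => p.2)

-- ===== PRECONDITION & SPEC =====
def Spec_select_program_rows (programme_name_or_id : String) (programs_kb : List (List (String × String))) (out : List (List (String × String))) : Prop := out = select_program_rows_alt programme_name_or_id programs_kb
instance (programme_name_or_id : String) (programs_kb : List (List (String × String))) (out : List (List (String × String))) : Decidable (Spec_select_program_rows programme_name_or_id programs_kb out) := by unfold Spec_select_program_rows; infer_instance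

-- ===== CLAIM =====
def Claim_equal_select_program_rows : Prop := ∀ (programme_name_or_id : String) (programs_kb : List (List (String × String))), Dom_select_program_rows programme_name_or_id programs_kb → Spec_select_program_rows programme_name_or_id programs_kb (select_program_rows programme_name_or_id programs_kb)

-- ===== LEMMAS AND PROOFS =====
theorem pvRank_eq_zero_iff (t : String) (r : List (String × String)) :
    (pvRankB t r = 0) ↔ pvExact t r = true := by
  unfold pvRankB
  split_ifs with h1 h2 <;> simp_all

-- an exact match is also a substring match
theorem pvExact_sub (t : String) (r : List (String × String)) :
    pvExact t r = true → pvSub t r = true := by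
  unfold pvExact pvSub
  intro h
  rcases Bool.or_eq_true_iff.1 h with h | h
  · apply Bool.or_eq_true_iff.2; left
    rw [beq_iff_eq] at h
    rw [PySem.Str.isIn_iff_infix, ← h]
  · apply Bool.or_eq_true_iff.2; right
    rw [beq_iff_eq] at h
    rw [PySem.Str.isIn_iff_infix, ← h]

theorem pvRank_le_one_iff (t : String) (r : List (String × String)) :
    (pvRankB t r ≤ 1) ↔ pvSub t r = true := by
  unfold pvRankB
  split_ifs with h1 h2
  · simpa using pvExact_sub t r h1
  · simp [h2]
  · simp [h2]

theorem pvRank_eq_one_iff (t : String) (r : List (String × String)) :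
    (pvRankB t r = 1) ↔ (pvSub t r = true ∧ pvExact t r = false) := by
  unfold pvRankB
  split_ifs with h1 h2
  · simp_all [pvExact_sub t r h1]
  · simp_all
  · simp_all

theorem pvRank_le_two (t : String) (r : List (String × String)) : pvRankB t r ≤ 2 := by
  unfold pvRankB; split_ifs <;> omega

-- foldl min over small naturals: the minimum is 0 / 1 / 2 according to membership
theorem pvFoldlMin_zero (l : List Nat) : l.foldl min 0 = 0 := by
  induction l with
  | nil => rfl
  | cons x l ih => simpa [List.foldl_cons, Nat.min_def] using ih

theorem pvFoldlMin_one (l : List Nat) :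
    l.foldl min 1 = if 0 ∈ l then 0 else 1 := by
  induction l with
  | nil => rfl
  | cons x l ih =>
      by_cases hx : x = 0
      · subst hx
        simp [pvFoldlMin_zero]
      · have h0x : ¬ (0 = x) := fun h => hx h.symm
        have hmin : min 1 x = 1 := by omega
        simp [hmin, ih, h0x]

theorem pvFoldlMin_char (l : List Nat) (h : ∀ x ∈ l, x ≤ 2) :
    l.foldl min 2 = if 0 ∈ l then 0 else if 1 ∈ l then 1 else 2 := by
  induction l with
  | nil => rfl
  | cons x l ih =>
      have hx : x ≤ 2 := h x (List.mem_cons_self ..)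
      have hl : ∀ y ∈ l, y ≤ 2 := fun y hy => h y (List.mem_cons_of_mem _ hy)
      interval_cases x
      · simp [pvFoldlMin_zero]
      · simp [pvFoldlMin_one]
      · simpa using ih hl

-- filtering ranked rows at rank b = filtering the rows by the rank predicate
theorem pvFilterRanked (t : String) (kb : List (List (String × String))) (b : Nat) :
    ((kb.map (fun r => (pvRankB t r, r))).filter (fun p => p.1 == b)).map (fun p => p.2)
      = kb.filter (fun r => pvRankB t r == b) := by
  induction kb with
  | nil => rfl
  | cons r kb ih =>
      by_cases h : pvRankB t r = b <;> simp [h, ih]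

-- ===== VERDICT =====
theorem select_program_rows_spec : Claim_equal_select_program_rows := by
  intro pn kb _
  unfold Spec_select_program_rows select_program_rows select_program_rows_alt
  split
  · rfl
  case isFalse hne =>
  set t := PySem.Str.lower (PySem.Str.strip pn) with ht
  -- A's filter predicates are (definitionally) pvExact / pvSub
  show (if kb.filter (fun r => pvExact t r) = [] then kb.filter (fun r => pvSub t r)
        else kb.filter (fun r => pvExact t r))
      = (if (((kb.map (fun r => (pvRankB t r, r))).foldl (fun best p => min best p.1) 2) == 2) = true
         then []
         else ((kb.map (fun r => (pvRankB t r, r))).filter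
                 (fun p => p.1 == (kb.map (fun r => (pvRankB t r, r))).foldl (fun best p => min best p.1) 2)).map
                (fun p => p.2))
  have hfold : ∀ (l : List (Nat × List (String × String))),
      l.foldl (fun best p => min best p.1) 2 = (l.map Prod.fst).foldl min 2 := by
    intro l
    rw [List.foldl_map]
  rw [hfold]
  have hranks : ∀ x ∈ (kb.map (fun r => (pvRankB t r, r))).map Prod.fst, x ≤ 2 := by
    intro x hx
    simp only [List.map_map, List.mem_map] at hx
    obtain ⟨r, _, hr⟩ := hx
    simpa [← hr] using pvRank_le_two t r
  rw [pvFoldlMin_char _ hranks]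
  have hmem : ∀ b : Nat, (b ∈ (kb.map (fun r => (pvRankB t r, r))).map Prod.fst)
      ↔ ∃ r ∈ kb, pvRankB t r = b := by
    intro b; simp [List.map_map, eq_comm]
  by_cases h0 : ∃ r ∈ kb, pvRankB t r = 0
  · -- exact matches exist: A returns its first filter, B the rank-0 rows
    have hm0 : (0 ∈ (kb.map (fun r => (pvRankB t r, r))).map Prod.fst) := (hmem 0).2 h0
    have hAne : kb.filter (fun r => pvExact t r) ≠ [] := by
      obtain ⟨r, hr, hr0⟩ := h0
      intro hnil
      have := List.filter_eq_nil_iff.1 hnil r hr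
      exact this ((pvRank_eq_zero_iff t r).1 hr0)
    rw [if_pos hm0, if_neg hAne, if_neg (by decide), pvFilterRanked]
    apply List.filter_congr
    intro r hr
    rw [Bool.eq_iff_iff]
    simp [beq_iff_eq, pvRank_eq_zero_iff]
  · by_cases h1 : ∃ r ∈ kb, pvRankB t r = 1
    · -- no exact match, substring matches exist
      have hm0 : ¬ (0 ∈ (kb.map (fun r => (pvRankB t r, r))).map Prod.fst) :=
        fun h => h0 ((hmem 0).1 h)
      have hm1 : (1 ∈ (kb.map (fun r => (pvRankB t r, r))).map Prod.fst) := (hmem 1).2 h1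
      have hAnil : kb.filter (fun r => pvExact t r) = [] := by
        apply List.filter_eq_nil_iff.2
        intro r hr hc
        exact h0 ⟨r, hr, (pvRank_eq_zero_iff t r).2 hc⟩
      rw [if_neg hm0, if_pos hm1, if_pos hAnil, if_neg (by decide), pvFilterRanked]
      apply List.filter_congr
      intro r hr
      have hnot0 : pvRankB t r ≠ 0 := fun h => h0 ⟨r, hr, h⟩
      rw [Bool.eq_iff_iff]
      simp only [beq_iff_eq]
      constructor
      · intro hs
        have he : pvExact t r = false := by
          cases hpe : pvExact t r
          · rfl
          · exact absurd ((pvRank_eq_zero_iff t r).2 hpe) hnot0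
        exact (pvRank_eq_one_iff t r).2 ⟨hs, he⟩
      · intro hb
        exact ((pvRank_eq_one_iff t r).1 hb).1
    · -- no match at all: both return []
      have hm0 : ¬ (0 ∈ (kb.map (fun r => (pvRankB t r, r))).map Prod.fst) :=
        fun h => h0 ((hmem 0).1 h)
      have hm1 : ¬ (1 ∈ (kb.map (fun r => (pvRankB t r, r))).map Prod.fst) :=
        fun h => h1 ((hmem 1).1 h)
      have hAnil : kb.filter (fun r => pvExact t r) = [] := by
        apply List.filter_eq_nil_iff.2
        intro r hr hc
        exact h0 ⟨r, hr, (pvRank_eq_zero_iff t r).2 hc⟩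
      rw [if_neg hm0, if_neg hm1, if_pos hAnil, if_pos (show ((2:Nat) == 2) = true from rfl)]
      apply List.filter_eq_nil_iff.2
      intro r hr hc
      have hle : pvRankB t r ≤ 1 := (pvRank_le_one_iff t r).2 hc
      have h2 : pvRankB t r = 0 ∨ pvRankB t r = 1 := by omega
      rcases h2 with h2 | h2
      · exact h0 ⟨r, hr, h2⟩
      · exact h1 ⟨r, hr, h2⟩
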